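-- pv_equiv track=rewrite | github.com/gyorilab/gilda | benchmarks/BioID_evaluation.py | _get_entity_type
-- ===== SOURCE A (Python) =====
-- def _get_entity_type(bioc_groundings):
--     """Get entity type based on entity groundings of text in corpus.
--     """
--     if any([x.startswith('NCBI gene')
--             or x.startswith('UP') for x in bioc_groundings]):
--         result = 'Gene'
--     elif any([x.startswith('Rfam') for x in bioc_groundings]):
--         result = 'miRNA'
--     elif any([x.startswith('CHEBI') or x.startswith('PubChem')
--               for x in bioc_groundings]):
--         result = 'Small Molecule'
--     elif any([x.startswith('GO') for x in bioc_groundings]):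
--         result = 'Cellular Component'
--     elif any([x.startswith('CVCL') or x.startswith('CL')
--               for x in bioc_groundings]):
--         result = 'Cell types/Cell lines'
--     elif any([x.startswith('UBERON') for x in bioc_groundings]):
--         result = 'Tissue/Organ'
--     elif any([x.startswith('NCBI taxon') for x in bioc_groundings]):
--         result = 'Taxon'
--     else:
--         result = 'unknown'
--     return result
-- ===== SOURCE B (Python) =====
-- _TIERS = [('NCBI gene', 'Gene'), ('UP', 'Gene'), ('Rfam', 'miRNA'),
--           ('CHEBI', 'Small Molecule'), ('PubChem', 'Small Molecule'),
--           ('GO', 'Cellular Component'), ('CVCL', 'Cell types/Cell lines'),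
--           ('CL', 'Cell types/Cell lines'), ('UBERON', 'Tissue/Organ'),
--           ('NCBI taxon', 'Taxon')]
--
--
-- def _rank(s):
--     for i, (prefix, _) in enumerate(_TIERS):
--         if s.startswith(prefix):
--             return i
--     return len(_TIERS)
--
--
-- def _get_entity_type(bioc_groundings):
--     best = len(_TIERS)
--     for s in bioc_groundings:
--         best = min(best, _rank(s))
--     return _TIERS[best][1] if best < len(_TIERS) else 'unknown'
-- ===== Notes on version B (the rewrite author's own statement) =====
-- stated objective: alternative
-- what changed: Replaced seven separate any() scans of the list (one per entity tier) by an ordered prefix-priority table and a single pass that keeps the minimum matching tier index, then indexes the table once.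
import Mathlib
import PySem

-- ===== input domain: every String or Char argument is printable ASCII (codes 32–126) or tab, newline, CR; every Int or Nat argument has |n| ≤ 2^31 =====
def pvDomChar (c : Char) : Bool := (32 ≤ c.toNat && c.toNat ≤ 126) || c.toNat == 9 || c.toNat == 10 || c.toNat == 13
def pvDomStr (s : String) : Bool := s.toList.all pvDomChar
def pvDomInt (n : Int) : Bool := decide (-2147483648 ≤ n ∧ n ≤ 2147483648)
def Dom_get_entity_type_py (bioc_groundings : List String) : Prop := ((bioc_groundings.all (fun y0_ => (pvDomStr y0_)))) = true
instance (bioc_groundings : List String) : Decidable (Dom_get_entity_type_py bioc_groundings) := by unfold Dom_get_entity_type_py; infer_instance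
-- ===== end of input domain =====

-- B replaces A's seven separate any() scans by one pass over the list keeping the minimum
-- matching index in an ordered prefix-priority table (objective: alternative decomposition).

-- ===== PORT A =====
def get_entity_type_py (bioc_groundings : List String) : String :=
  if (bioc_groundings.map (fun x =>
        PySem.Str.startswith x "NCBI gene" || PySem.Str.startswith x "UP")).any id then "Gene"
  else if (bioc_groundings.map (fun x => PySem.Str.startswith x "Rfam")).any id then "miRNA"
  else if (bioc_groundings.map (fun x =>
        PySem.Str.startswith x "CHEBI" || PySem.Str.startswith x "PubChem")).any id then "Small Molecule"
  else if (bioc_groundings.map (fun x => PySem.Str.startswith x "GO")).any id then "Cellular Component"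
  else if (bioc_groundings.map (fun x =>
        PySem.Str.startswith x "CVCL" || PySem.Str.startswith x "CL")).any id then "Cell types/Cell lines"
  else if (bioc_groundings.map (fun x => PySem.Str.startswith x "UBERON")).any id then "Tissue/Organ"
  else if (bioc_groundings.map (fun x => PySem.Str.startswith x "NCBI taxon")).any id then "Taxon"
  else "unknown"

-- ===== PORT B =====
-- the ordered priority table _TIERS of Source B
def pvTiers : List (String × String) :=
  [("NCBI gene", "Gene"), ("UP", "Gene"), ("Rfam", "miRNA"),
   ("CHEBI", "Small Molecule"), ("PubChem", "Small Molecule"),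
   ("GO", "Cellular Component"), ("CVCL", "Cell types/Cell lines"),
   ("CL", "Cell types/Cell lines"), ("UBERON", "Tissue/Organ"),
   ("NCBI taxon", "Taxon")]

-- _rank's loop: index of the first tier prefix s starts with, or the table length
def pvRankGo (s : String) : List (String × String) → Nat
  | [] => 0
  | pr :: rest => if PySem.Str.startswith s pr.1 then 0 else pvRankGo s rest + 1

def pvRank (s : String) : Nat := pvRankGo s pvTiers

def get_entity_type_py_alt (bioc_groundings : List String) : String :=
  let best := bioc_groundings.foldl (fun b s => min b (pvRank s)) pvTiers.length
  if h : best < pvTiers.length then (pvTiers[best]).2 else "unknown"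

-- ===== PRECONDITION & SPEC =====
def Spec_get_entity_type_py (bioc_groundings : List String) (out : String) : Prop := out = get_entity_type_py_alt bioc_groundings
instance (bioc_groundings : List String) (out : String) : Decidable (Spec_get_entity_type_py bioc_groundings out) := by unfold Spec_get_entity_type_py; infer_instance

-- ===== CLAIM (what is proved, stated in full; the proofs are below) =====
def Claim_equal_get_entity_type_py : Prop := ∀ (bioc_groundings : List String), Dom_get_entity_type_py bioc_groundings → Spec_get_entity_type_py bioc_groundings (get_entity_type_py bioc_groundings)

-- ===== LEMMAS AND PROOFS =====

theorem pvFold_le_init (l : List String) (a : Nat) :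
    l.foldl (fun b s => min b (pvRank s)) a ≤ a := by
  induction l generalizing a with
  | nil => simp
  | cons x xs ih =>
      simp only [List.foldl_cons]
      exact le_trans (ih _) (Nat.min_le_left _ _)

theorem pvFold_le_iff (l : List String) (a k : Nat) :
    l.foldl (fun b s => min b (pvRank s)) a ≤ k ↔ a ≤ k ∨ ∃ x ∈ l, pvRank x ≤ k := by
  induction l generalizing a with
  | nil => simp
  | cons x xs ih =>
      simp only [List.foldl_cons, ih, min_le_iff, List.mem_cons]
      constructor
      · rintro (⟨h | h⟩ | ⟨y, hy, hr⟩)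
        · exact Or.inl h
        · exact Or.inr ⟨x, Or.inl rfl, h⟩
        · exact Or.inr ⟨y, Or.inr hy, hr⟩
      · rintro (h | ⟨y, (rfl | hy), hr⟩)
        · exact Or.inl (Or.inl h)
        · exact Or.inl (Or.inr hr)
        · exact Or.inr ⟨y, hy, hr⟩

set_option maxHeartbeats 2000000 in
theorem pvRank_eq (s : String) : pvRank s =
    if PySem.Str.startswith s "NCBI gene" then 0
    else if PySem.Str.startswith s "UP" then 1
    else if PySem.Str.startswith s "Rfam" then 2
    else if PySem.Str.startswith s "CHEBI" then 3
    else if PySem.Str.startswith s "PubChem" then 4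
    else if PySem.Str.startswith s "GO" then 5
    else if PySem.Str.startswith s "CVCL" then 6
    else if PySem.Str.startswith s "CL" then 7
    else if PySem.Str.startswith s "UBERON" then 8
    else if PySem.Str.startswith s "NCBI taxon" then 9
    else 10 := by
  simp only [pvRank, pvTiers, pvRankGo]
  split_ifs <;> omega

-- forward lemmas: a tier prefix match bounds the rank
set_option maxHeartbeats 2000000 in
theorem pvFw1 (x : String) (h : (PySem.Str.startswith x "NCBI gene" || PySem.Str.startswith x "UP") = true) : pvRank x ≤ 1 := by
  rw [pvRank_eq]; split_ifs <;> first | omega | simp_all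

set_option maxHeartbeats 2000000 in
theorem pvFw2 (x : String) (h : PySem.Str.startswith x "Rfam" = true) : pvRank x ≤ 2 := by
  rw [pvRank_eq]; split_ifs <;> first | omega | simp_all

set_option maxHeartbeats 2000000 in
theorem pvFw3 (x : String) (h : (PySem.Str.startswith x "CHEBI" || PySem.Str.startswith x "PubChem") = true) : pvRank x ≤ 4 := by
  rw [pvRank_eq]; split_ifs <;> first | omega | simp_all

set_option maxHeartbeats 2000000 in
theorem pvFw4 (x : String) (h : PySem.Str.startswith x "GO" = true) : pvRank x ≤ 5 := by
  rw [pvRank_eq]; split_ifs <;> first | omega | simp_all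

set_option maxHeartbeats 2000000 in
theorem pvFw5 (x : String) (h : (PySem.Str.startswith x "CVCL" || PySem.Str.startswith x "CL") = true) : pvRank x ≤ 7 := by
  rw [pvRank_eq]; split_ifs <;> first | omega | simp_all

set_option maxHeartbeats 2000000 in
theorem pvFw6 (x : String) (h : PySem.Str.startswith x "UBERON" = true) : pvRank x ≤ 8 := by
  rw [pvRank_eq]; split_ifs <;> first | omega | simp_all

set_option maxHeartbeats 2000000 in
theorem pvFw7 (x : String) (h : PySem.Str.startswith x "NCBI taxon" = true) : pvRank x ≤ 9 := by
  rw [pvRank_eq]; split_ifs <;> first | omega | simp_all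

-- backward lemmas: a rank inside a tier's index window forces that tier's prefix match
set_option maxHeartbeats 2000000 in
theorem pvBw1 (x : String) (h : pvRank x ≤ 1) : (PySem.Str.startswith x "NCBI gene" || PySem.Str.startswith x "UP") = true := by
  rw [pvRank_eq] at h; split_ifs at h <;> simp_all

set_option maxHeartbeats 2000000 in
theorem pvBw2 (x : String) (h1 : 1 < pvRank x) (h2 : pvRank x ≤ 2) : PySem.Str.startswith x "Rfam" = true := by
  rw [pvRank_eq] at h1 h2; split_ifs at h1 h2 <;> first | assumption | simp_all | omega

set_option maxHeartbeats 2000000 in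
theorem pvBw3 (x : String) (h1 : 2 < pvRank x) (h2 : pvRank x ≤ 4) : (PySem.Str.startswith x "CHEBI" || PySem.Str.startswith x "PubChem") = true := by
  rw [pvRank_eq] at h1 h2; split_ifs at h1 h2 <;> first | assumption | simp_all | omega

set_option maxHeartbeats 2000000 in
theorem pvBw4 (x : String) (h1 : 4 < pvRank x) (h2 : pvRank x ≤ 5) : PySem.Str.startswith x "GO" = true := by
  rw [pvRank_eq] at h1 h2; split_ifs at h1 h2 <;> first | assumption | simp_all | omega

set_option maxHeartbeats 2000000 in
theorem pvBw5 (x : String) (h1 : 5 < pvRank x) (h2 : pvRank x ≤ 7) : (PySem.Str.startswith x "CVCL" || PySem.Str.startswith x "CL") = true := by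
  rw [pvRank_eq] at h1 h2; split_ifs at h1 h2 <;> first | assumption | simp_all | omega

set_option maxHeartbeats 2000000 in
theorem pvBw6 (x : String) (h1 : 7 < pvRank x) (h2 : pvRank x ≤ 8) : PySem.Str.startswith x "UBERON" = true := by
  rw [pvRank_eq] at h1 h2; split_ifs at h1 h2 <;> first | assumption | simp_all | omega

set_option maxHeartbeats 2000000 in
theorem pvBw7 (x : String) (h1 : 8 < pvRank x) (h2 : pvRank x ≤ 9) : PySem.Str.startswith x "NCBI taxon" = true := by
  rw [pvRank_eq] at h1 h2; split_ifs at h1 h2 <;> first | assumption | simp_all | omega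

set_option maxHeartbeats 2000000 in
theorem pvTierName (j : Nat) (hj : j < pvTiers.length) :
    (pvTiers[j]).2 =
      if j ≤ 1 then "Gene" else if j ≤ 2 then "miRNA" else if j ≤ 4 then "Small Molecule"
      else if j ≤ 5 then "Cellular Component" else if j ≤ 7 then "Cell types/Cell lines"
      else if j ≤ 8 then "Tissue/Organ" else "Taxon" := by
  have h10 : j < 10 := by simpa [pvTiers] using hj
  interval_cases j <;> rfl

set_option maxHeartbeats 2000000 in
theorem pvMain (l : List String) : get_entity_type_py l = get_entity_type_py_alt l := by
  unfold get_entity_type_py get_entity_type_py_alt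
  have hlen : pvTiers.length = 10 := rfl
  set m := l.foldl (fun b s => min b (pvRank s)) pvTiers.length with hm
  have hm10 : m ≤ 10 := by
    have := pvFold_le_init l pvTiers.length
    rw [← hm] at this; omega
  have hiff : ∀ k, k ≤ 9 → (m ≤ k ↔ ∃ x ∈ l, pvRank x ≤ k) := by
    intro k hk
    rw [hm, pvFold_le_iff, hlen]
    constructor
    · rintro (h' | h')
      · omega
      · exact h'
    · exact Or.inr
  have hany : ∀ f : String → Bool, ((l.map f).any id = true) ↔ ∃ x ∈ l, f x = true := by
    intro f; simp
  have hcondF : ∀ (f : String → Bool) (hi : Nat), hi ≤ 9 →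
      (∀ x, f x = true → pvRank x ≤ hi) → ¬ (m ≤ hi) → (l.map f).any id = false := by
    intro f hi hhi hf hnm
    rw [← Bool.not_eq_true, hany]
    rintro ⟨x, hx, hfx⟩
    exact hnm ((hiff hi hhi).mpr ⟨x, hx, hf x hfx⟩)
  have hallgt : ∀ (k : Nat), k ≤ 9 → ¬ (m ≤ k) → ∀ x ∈ l, k < pvRank x := by
    intro k hk hnm x hx
    by_contra hc
    exact hnm ((hiff k hk).mpr ⟨x, hx, by omega⟩)
  by_cases h1 : m ≤ 1
  · obtain ⟨x, hx, hr⟩ := (hiff 1 (by omega)).mp h1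
    have hc1 : (l.map (fun x => PySem.Str.startswith x "NCBI gene" || PySem.Str.startswith x "UP")).any id = true := (hany _).mpr ⟨x, hx, pvBw1 x hr⟩
    have hb : m < pvTiers.length := by rw [hlen]; omega
    rw [hc1, dif_pos hb, pvTierName m hb, if_pos rfl]
    split_ifs <;> first | rfl | omega
  · have hc1 : (l.map (fun x => PySem.Str.startswith x "NCBI gene" || PySem.Str.startswith x "UP")).any id = false := hcondF _ 1 (by omega) pvFw1 h1
    by_cases h2 : m ≤ 2
    · obtain ⟨x, hx, hr⟩ := (hiff 2 (by omega)).mp h2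
      have hc2 : (l.map (fun x => PySem.Str.startswith x "Rfam")).any id = true := (hany _).mpr ⟨x, hx, pvBw2 x (hallgt 1 (by omega) h1 x hx) hr⟩
      have hb : m < pvTiers.length := by rw [hlen]; omega
      rw [hc1, hc2, dif_pos hb, pvTierName m hb]
      simp only [Bool.false_eq_true, if_false, if_true]
      split_ifs <;> first | rfl | omega
    · have hc2 : (l.map (fun x => PySem.Str.startswith x "Rfam")).any id = false := hcondF _ 2 (by omega) pvFw2 h2
      by_cases h3 : m ≤ 4
      · obtain ⟨x, hx, hr⟩ := (hiff 4 (by omega)).mp h3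
        have hc3 : (l.map (fun x => PySem.Str.startswith x "CHEBI" || PySem.Str.startswith x "PubChem")).any id = true := (hany _).mpr ⟨x, hx, pvBw3 x (hallgt 2 (by omega) h2 x hx) hr⟩
        have hb : m < pvTiers.length := by rw [hlen]; omega
        rw [hc1, hc2, hc3, dif_pos hb, pvTierName m hb]
        simp only [Bool.false_eq_true, if_false, if_true]
        split_ifs <;> first | rfl | omega
      · have hc3 : (l.map (fun x => PySem.Str.startswith x "CHEBI" || PySem.Str.startswith x "PubChem")).any id = false := hcondF _ 4 (by omega) pvFw3 h3
        by_cases h4 : m ≤ 5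
        · obtain ⟨x, hx, hr⟩ := (hiff 5 (by omega)).mp h4
          have hc4 : (l.map (fun x => PySem.Str.startswith x "GO")).any id = true := (hany _).mpr ⟨x, hx, pvBw4 x (hallgt 4 (by omega) h3 x hx) hr⟩
          have hb : m < pvTiers.length := by rw [hlen]; omega
          rw [hc1, hc2, hc3, hc4, dif_pos hb, pvTierName m hb]
          simp only [Bool.false_eq_true, if_false, if_true]
          split_ifs <;> first | rfl | omega
        · have hc4 : (l.map (fun x => PySem.Str.startswith x "GO")).any id = false := hcondF _ 5 (by omega) pvFw4 h4
          by_cases h5 : m ≤ 7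
          · obtain ⟨x, hx, hr⟩ := (hiff 7 (by omega)).mp h5
            have hc5 : (l.map (fun x => PySem.Str.startswith x "CVCL" || PySem.Str.startswith x "CL")).any id = true := (hany _).mpr ⟨x, hx, pvBw5 x (hallgt 5 (by omega) h4 x hx) hr⟩
            have hb : m < pvTiers.length := by rw [hlen]; omega
            rw [hc1, hc2, hc3, hc4, hc5, dif_pos hb, pvTierName m hb]
            simp only [Bool.false_eq_true, if_false, if_true]
            split_ifs <;> first | rfl | omega
          · have hc5 : (l.map (fun x => PySem.Str.startswith x "CVCL" || PySem.Str.startswith x "CL")).any id = false := hcondF _ 7 (by omega) pvFw5 h5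
            by_cases h6 : m ≤ 8
            · obtain ⟨x, hx, hr⟩ := (hiff 8 (by omega)).mp h6
              have hc6 : (l.map (fun x => PySem.Str.startswith x "UBERON")).any id = true := (hany _).mpr ⟨x, hx, pvBw6 x (hallgt 7 (by omega) h5 x hx) hr⟩
              have hb : m < pvTiers.length := by rw [hlen]; omega
              rw [hc1, hc2, hc3, hc4, hc5, hc6, dif_pos hb, pvTierName m hb]
              simp only [Bool.false_eq_true, if_false, if_true]
              split_ifs <;> first | rfl | omega
            · have hc6 : (l.map (fun x => PySem.Str.startswith x "UBERON")).any id = false := hcondF _ 8 (by omega) pvFw6 h6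
              by_cases h7 : m ≤ 9
              · obtain ⟨x, hx, hr⟩ := (hiff 9 (by omega)).mp h7
                have hc7 : (l.map (fun x => PySem.Str.startswith x "NCBI taxon")).any id = true := (hany _).mpr ⟨x, hx, pvBw7 x (hallgt 8 (by omega) h6 x hx) hr⟩
                have hb : m < pvTiers.length := by rw [hlen]; omega
                rw [hc1, hc2, hc3, hc4, hc5, hc6, hc7, dif_pos hb, pvTierName m hb]
                simp only [Bool.false_eq_true, if_false, if_true]
                split_ifs <;> first | rfl | omega
              · have hc7 : (l.map (fun x => PySem.Str.startswith x "NCBI taxon")).any id = false := hcondF _ 9 (by omega) pvFw7 h7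
                rw [hc1, hc2, hc3, hc4, hc5, hc6, hc7, dif_neg (by rw [hlen]; omega : ¬ m < pvTiers.length)]
                simp only [Bool.false_eq_true, if_false]

-- ===== VERDICT (by name: the statement is the Claim_ definition above) =====
theorem get_entity_type_py_spec : Claim_equal_get_entity_type_py := by
  intro l _
  unfold Spec_get_entity_type_py
  exact pvMain l
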